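-- pv_equiv track=rewrite | github.com/lukestrain/AdventCode2024 | Advent of Code/Day 1/Day1.py | Part2
-- ===== SOURCE A (Python) =====
-- def Part2(listA, listB):
--     #Determines the Similarity Score
--     simScore = 0
--
--     for i in range(len(listA)):
--         #For each item in List A, I will count the occurances in List B that match it, then use the similarty score fomula to add that to the simScore variable
--         listItem = listA[i]
--         occurances = 0
--         for j in range(len(listB)):
--             if listB[j] == listItem:
--                 occurances += 1
--         simScore += (listItem * occurances)
--
--     return simScore
-- ===== SOURCE B (Python) =====
-- def Part2(listA, listB):
--     # Sort copies of both lists, then a single merge pass multiplies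
--     # each common value by its run length in both lists.
--     sa = sorted(listA)
--     sb = sorted(listB)
--     n, m = len(sa), len(sb)
--     score = 0
--     i = j = 0
--     while i < n and j < m:
--         if sa[i] < sb[j]:
--             i += 1
--         elif sb[j] < sa[i]:
--             j += 1
--         else:
--             v = sa[i]
--             ca = 0
--             while i < n and sa[i] == v:
--                 ca += 1
--                 i += 1
--             cb = 0
--             while j < m and sb[j] == v:
--                 cb += 1
--                 j += 1
--             score += v * ca * cb
--     return score
-- ===== Notes on version B (the rewrite author's own statement) =====
-- stated objective: faster
-- what changed: Replaces the per-A-element inner scan of listB with sorting copies of both lists and one two-pointer merge pass that multiplies each common value by its run lengths in both lists.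
import Mathlib
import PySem

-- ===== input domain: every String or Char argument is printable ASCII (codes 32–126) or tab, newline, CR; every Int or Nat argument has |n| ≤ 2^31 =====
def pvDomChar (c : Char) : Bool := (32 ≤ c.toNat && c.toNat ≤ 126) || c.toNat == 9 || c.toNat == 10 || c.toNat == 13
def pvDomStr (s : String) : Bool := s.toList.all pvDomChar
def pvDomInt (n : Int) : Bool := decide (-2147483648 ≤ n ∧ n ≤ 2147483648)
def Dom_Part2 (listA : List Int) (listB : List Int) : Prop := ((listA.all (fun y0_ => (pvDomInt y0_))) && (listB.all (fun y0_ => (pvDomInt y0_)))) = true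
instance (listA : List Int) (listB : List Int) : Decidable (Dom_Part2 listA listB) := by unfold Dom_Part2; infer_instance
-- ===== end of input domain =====

-- B sorts copies of both lists and does one two-pointer merge pass instead of A's per-element scan of listB.

-- ===== PORT A =====
def Part2 (listA : List Int) (listB : List Int) : Int :=
  (PySem.List.pyRange 0 listA.length 1).foldl (fun simScore i =>
    let listItem := PySem.List.pyGetD listA i 0
    let occurances := (PySem.List.pyRange 0 listB.length 1).foldl (fun occ j =>
      if PySem.List.pyGetD listB j 0 == listItem then occ + 1 else occ) (0 : Int)
    simScore + listItem * occurances) 0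

-- ===== PORT B =====
-- the while-loop over indices i, j of Source B, transcribed as recursion on the two suffixes;
-- the inner run-counting whiles become takeWhile lengths, the suffixes advance past the runs
def mergeScore : List Int → List Int → Int
  | [], _ => 0
  | _ :: _, [] => 0
  | a :: as, b :: bs =>
    if a < b then mergeScore as (b :: bs)
    else if b < a then mergeScore (a :: as) bs
    else
      a * (((a :: as).takeWhile (· == a)).length : Int) * (((b :: bs).takeWhile (· == a)).length : Int)
        + mergeScore ((a :: as).dropWhile (· == a)) ((b :: bs).dropWhile (· == a))
termination_by as bs => as.length + bs.length
decreasing_by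
  · simp
  · simp
  · have hba : b = a := le_antisymm (Int.not_lt.mp ‹¬ a < b›) (Int.not_lt.mp ‹¬ b < a›)
    subst hba
    simp only [List.dropWhile_cons, beq_self_eq_true, if_true, List.length_cons]
    have h1 := List.length_dropWhile_le (p := (· == b)) (l := as)
    have h2 := List.length_dropWhile_le (p := (· == b)) (l := bs)
    omega

def Part2_alt (listA : List Int) (listB : List Int) : Int :=
  let sa := PySem.List.sorted listA (fun x => x) false
  let sb := PySem.List.sorted listB (fun x => x) false
  mergeScore sa sb

-- ===== PRECONDITION & SPEC =====
def Spec_Part2 (listA : List Int) (listB : List Int) (out : Int) : Prop := out = Part2_alt listA listB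
instance (listA : List Int) (listB : List Int) (out : Int) : Decidable (Spec_Part2 listA listB out) := by unfold Spec_Part2; infer_instance

-- ===== CLAIM (what is proved, stated in full; the proofs are below) =====
def Claim_equal_Part2 : Prop := ∀ (listA : List Int) (listB : List Int), Dom_Part2 listA listB → Spec_Part2 listA listB (Part2 listA listB)

-- ===== LEMMAS AND PROOFS =====

-- the mathematical similarity score: Σ_{x ∈ as} x * (count of x in bs)
def simSum (as bs : List Int) : Int :=
  (as.map (fun x => x * (bs.count x : Int))).sum

theorem part2_eq_simSum (listA listB : List Int) : Part2 listA listB = simSum listA listB := by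
  unfold Part2 simSum
  show (PySem.List.pyRange 0 listA.length 1).foldl (fun simScore i =>
      simScore + (PySem.List.pyGetD listA i 0) *
        ((PySem.List.pyRange 0 listB.length 1).foldl (fun occ j =>
          if PySem.List.pyGetD listB j 0 == PySem.List.pyGetD listA i 0 then occ + 1 else occ) (0 : Int))) 0
    = (listA.map (fun x => x * (listB.count x : Int))).sum
  rw [PySem.List.foldl_pyRange_zero_pyGetD' listA 0
      (fun acc x => acc + x * ((PySem.List.pyRange 0 listB.length 1).foldl (fun occ j =>
        if PySem.List.pyGetD listB j 0 == x then occ + 1 else occ) (0 : Int))) 0]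
  induction listA using List.reverseRecOn with
  | nil => simp
  | append_singleton xs x ih =>
    rw [List.foldl_append, List.map_append, List.sum_append, ih]
    rw [List.foldl_cons, List.foldl_nil,
        PySem.List.foldl_pyRange_zero_pyGetD' listB 0
          (fun occ y => if y == x then occ + 1 else occ) 0,
        PySem.List.foldl_beq_add_one]
    simp

theorem simSum_nil_right (as : List Int) : simSum as [] = 0 := by
  unfold simSum; simp

theorem simSum_perm (as as' bs bs' : List Int) (ha : as'.Perm as) (hb : bs'.Perm bs) :
    simSum as bs = simSum as' bs' := by
  unfold simSum
  have hcnt : ∀ x : Int, bs.count x = bs'.count x := fun x => (hb.count_eq x).symm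
  have hmap : (as.map (fun x => x * (bs.count x : Int))) = as.map (fun x => x * (bs'.count x : Int)) :=
    List.map_congr_left (fun x _ => by rw [hcnt])
  rw [hmap]
  exact (List.Perm.sum_eq ((ha.map _))).symm

theorem takeWhile_beq_replicate (a : Int) (l : List Int) :
    l.takeWhile (· == a) = List.replicate (l.takeWhile (· == a)).length a := by
  rw [List.eq_replicate_iff]
  refine ⟨rfl, fun b hb => ?_⟩
  exact eq_of_beq (List.mem_takeWhile_imp (p := fun x => x == a) hb)

theorem mem_dropWhile_gt (a : Int) (l : List Int)
    (hs : l.Pairwise (· ≤ ·)) (hge : ∀ y ∈ l, a ≤ y) :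
    ∀ y ∈ l.dropWhile (· == a), a < y := by
  induction l with
  | nil => simp
  | cons c t ih =>
    intro y hy
    by_cases hc : c = a
    · subst hc
      simp only [List.dropWhile_cons, beq_self_eq_true, if_true] at hy
      exact ih hs.of_cons (fun z hz => hge z (List.mem_cons_of_mem _ hz)) y hy
    · simp only [List.dropWhile_cons, beq_iff_eq, hc, if_false] at hy
      rcases List.mem_cons.mp hy with rfl | hyt
      · exact lt_of_le_of_ne (hge y List.mem_cons_self) (Ne.symm hc)
      · have hcy : c ≤ y := (List.pairwise_cons.mp hs).1 y hyt
        have hac : a < c := lt_of_le_of_ne (hge c List.mem_cons_self) (Ne.symm hc)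
        omega

theorem mergeScore_eq_simSum (as bs : List Int)
    (hsa : as.Pairwise (· ≤ ·)) (hsb : bs.Pairwise (· ≤ ·)) :
    mergeScore as bs = simSum as bs := by
  induction as, bs using mergeScore.induct with
  | case1 bs => rw [mergeScore]; simp [simSum]
  | case2 a as => rw [mergeScore]; rw [simSum_nil_right]
  | case3 a as b bs hab ih =>
    rw [mergeScore, if_pos hab, ih hsa.of_cons hsb]
    have hcz : (b :: bs).count a = 0 := by
      rw [List.count_eq_zero]
      intro hmem
      rcases List.mem_cons.mp hmem with rfl | hmem'
      · omega
      · have := (List.pairwise_cons.mp hsb).1 a hmem'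
        omega
    unfold simSum
    rw [List.map_cons, List.sum_cons, hcz]
    simp
  | case4 a as b bs hab hba ih =>
    rw [mergeScore, if_neg hab, if_pos hba, ih hsa hsb.of_cons]
    unfold simSum
    congr 1
    refine List.map_congr_left (fun x hx => ?_)
    have hax : a ≤ x := by
      rcases List.mem_cons.mp hx with rfl | hx'
      · exact le_refl _
      · exact (List.pairwise_cons.mp hsa).1 x hx'
    have hxb : x ≠ b := by omega
    simp only [List.count_cons, beq_iff_eq]
    have hne : ¬ (b = x) := fun h => hxb h.symm
    simp [hne]
  | case5 a as b bs hab hba ih =>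
    have hb : b = a := le_antisymm (Int.not_lt.mp hab) (Int.not_lt.mp hba)
    rw [hb] at hab hba ih ⊢
    rw [hb] at hsb
    rw [mergeScore, if_neg hab, if_neg hba]
    set ca : Nat := ((a :: as).takeWhile (· == a)).length with hca
    set cb : Nat := ((a :: bs).takeWhile (· == a)).length with hcb
    set as' := (a :: as).dropWhile (· == a) with has'
    set bs' := (a :: bs).dropWhile (· == a) with hbs'
    have hgeA : ∀ y ∈ (a :: as), a ≤ y := by
      intro y hy
      rcases List.mem_cons.mp hy with rfl | hy'
      · exact le_refl _
      · exact (List.pairwise_cons.mp hsa).1 y hy'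
    have hgeB : ∀ y ∈ (a :: bs), a ≤ y := by
      intro y hy
      rcases List.mem_cons.mp hy with rfl | hy'
      · exact le_refl _
      · exact (List.pairwise_cons.mp hsb).1 y hy'
    have hgtA := mem_dropWhile_gt a (a :: as) hsa hgeA
    have hgtB := mem_dropWhile_gt a (a :: bs) hsb hgeB
    have hsa' : as'.Pairwise (· ≤ ·) := hsa.sublist (List.dropWhile_sublist _)
    have hsb' : bs'.Pairwise (· ≤ ·) := hsb.sublist (List.dropWhile_sublist _)
    rw [ih hsa' hsb']
    have hdecA : (a :: as) = List.replicate ca a ++ as' := by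
      conv_lhs => rw [← List.takeWhile_append_dropWhile (p := (· == a)) (l := a :: as)]
      rw [← has', hca, ← takeWhile_beq_replicate]
    have hdecB : (a :: bs) = List.replicate cb a ++ bs' := by
      conv_lhs => rw [← List.takeWhile_append_dropWhile (p := (· == a)) (l := a :: bs)]
      rw [← hbs', hcb, ← takeWhile_beq_replicate]
    have hcount : ((a :: bs).count a : Int) = (cb : Int) := by
      rw [hdecB, List.count_append, List.count_replicate_self]
      have hz : bs'.count a = 0 := by
        rw [List.count_eq_zero]
        intro hmem
        exact absurd (hgtB a hmem) (lt_irrefl a)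
      rw [hz]; simp
    conv_rhs => rw [show simSum (a :: as) (a :: bs) = simSum (List.replicate ca a ++ as') (a :: bs) by rw [← hdecA]]
    unfold simSum
    rw [List.map_append, List.sum_append]
    have hrep : ((List.replicate ca a).map (fun x => x * ((a :: bs).count x : Int))).sum
        = a * ca * cb := by
      rw [List.map_replicate, hcount, List.sum_replicate, nsmul_eq_mul]
      ring
    have htail : (as'.map (fun x => x * ((a :: bs).count x : Int))).sum
        = (as'.map (fun x => x * (bs'.count x : Int))).sum := by
      congr 1
      refine List.map_congr_left (fun x hx => ?_)
      have hxa : a < x := hgtA x hx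
      have hne : ¬ (x = a) := by omega
      have hne' : ¬ (a = x) := fun h => hne h.symm
      rw [hdecB, List.count_append, List.count_replicate]
      simp [hne']
    rw [hrep, htail]

-- ===== VERDICT (by name: the statement is the Claim_ definition above) =====
theorem Part2_spec : Claim_equal_Part2 := by
  intro listA listB _
  unfold Spec_Part2 Part2_alt
  show Part2 listA listB = mergeScore (PySem.List.sorted listA (fun x => x) false) (PySem.List.sorted listB (fun x => x) false)
  have hpa := PySem.List.sorted_perm (xs := listA) (key := fun x : Int => x) (rev := false)
  have hpb := PySem.List.sorted_perm (xs := listB) (key := fun x : Int => x) (rev := false)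
  have hsa : (PySem.List.sorted listA (fun x : Int => x) false).Pairwise (· ≤ ·) := by
    simpa using PySem.List.sorted_pairwise (xs := listA) (key := fun x : Int => x)
  have hsb : (PySem.List.sorted listB (fun x : Int => x) false).Pairwise (· ≤ ·) := by
    simpa using PySem.List.sorted_pairwise (xs := listB) (key := fun x : Int => x)
  rw [part2_eq_simSum, mergeScore_eq_simSum _ _ hsa hsb]
  exact simSum_perm _ _ _ _ hpa hpb
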